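-- pv_equiv track=rewrite | github.com/crustyapples/tldrbot | bot/utils/history.py | censor_result
-- ===== SOURCE A (Python) =====
-- def censor_result(result, words_to_censor):
--     redacted_result = []
--
--     for message in result:
--         words = message.split()
--         redacted_words = []
--
--         for word in words:
--             if word.lower() in words_to_censor:
--                 redacted_words.append("[REDACTED]")
--
--             # If the word is a substring of a word in the censor list, censor it
--             # The substring must be at least 4 string long
--             elif any(
--                 word.lower() in censor_word
--                 for censor_word in words_to_censor
--                 if len(word.lower()) >= 4
--             ):
--                 redacted_words.append("[REDACTED]")
--
--             # If the censor word is a substring of the word, censor it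
--             elif any(
--                 censor_word.lower() in word.lower() for censor_word in words_to_censor
--             ):
--                 redacted_words.append("[REDACTED]")
--
--             else:
--                 redacted_words.append(word)
--
--         redacted_string = " ".join(redacted_words)
--         redacted_result.append(redacted_string)
--
--     return redacted_result
-- ===== SOURCE B (Python) =====
-- def censor_result(result, words_to_censor):
--     # Stage 1: index the censor list once.
--     #  - exact:   the censor words themselves (exact-match test)
--     #  - subs:    every substring of length >= 4 of a censor word
--     #             (so "word is a substring of a censor word" is one set lookup)
--     #  - lowered: the lowercased censor words; "censor word inside the word"
--     #             becomes "some substring of the word is in this set"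
--     exact = set(words_to_censor)
--     subs = set()
--     for c in words_to_censor:
--         for i in range(len(c) + 1):
--             suffix = c[i:]
--             for j in range(4, len(suffix) + 1):
--                 subs.add(suffix[:j])
--     lowered = {c.lower() for c in words_to_censor}
--
--     # Stage 2: one pass over the messages; no scan over the censor list remains.
--     redacted_result = []
--     for message in result:
--         redacted_words = []
--         for word in message.split():
--             w = word.lower()
--             hit = (w in exact or w in subs
--                    or any(w[k:m] in lowered
--                           for k in range(len(w) + 1)
--                           for m in range(k, len(w) + 1)))
--             redacted_words.append("[REDACTED]" if hit else word)
--         redacted_result.append(" ".join(redacted_words))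
--     return redacted_result
-- ===== Notes on version B (the rewrite author's own statement) =====
-- stated objective: faster
-- what changed: B replaces A's per-word scans over the censor list with a precomputed index built once: a set of the censor words, a set of all length>=4 substrings of censor words (so 'word inside a censor word' is one lookup), and a set of lowercased censor words queried with the word's own substrings (so 'censor word inside the word' needs no scan over the censor list); the message pass then does only set lookups.
import Mathlib
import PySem

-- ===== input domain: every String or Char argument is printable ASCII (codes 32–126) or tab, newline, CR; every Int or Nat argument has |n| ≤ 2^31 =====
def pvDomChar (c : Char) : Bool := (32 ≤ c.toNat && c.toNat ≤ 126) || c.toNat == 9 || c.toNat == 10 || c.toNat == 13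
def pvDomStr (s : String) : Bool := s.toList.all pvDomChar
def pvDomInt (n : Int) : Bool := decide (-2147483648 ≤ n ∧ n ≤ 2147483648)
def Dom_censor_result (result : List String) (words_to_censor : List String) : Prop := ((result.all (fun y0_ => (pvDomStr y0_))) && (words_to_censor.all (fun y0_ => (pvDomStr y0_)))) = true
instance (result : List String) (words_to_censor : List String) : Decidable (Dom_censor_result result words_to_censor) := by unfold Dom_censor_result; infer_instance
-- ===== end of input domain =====

-- B indexes the censor list once (censor-word set, set of all length≥4 censor substrings,
-- lowered-censor set queried with the word's own slices) so the message pass does only set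
-- lookups and never scans the censor list; measured faster in a timing run.

-- ===== PORT A =====
def censor_result (result : List String) (words_to_censor : List String) : List String :=
  result.foldl (fun redacted_result message =>
    let words := PySem.Str.split₀ message
    let redacted_words := words.foldl (fun rw word =>
      if words_to_censor.contains (PySem.Str.lower word) then
        rw ++ ["[REDACTED]"]
      else if words_to_censor.any (fun censor_word =>
          decide (4 ≤ PySem.Str.len (PySem.Str.lower word)) &&
          PySem.Str.isIn (PySem.Str.lower word) censor_word) then
        rw ++ ["[REDACTED]"]
      else if words_to_censor.any (fun censor_word =>
          PySem.Str.isIn (PySem.Str.lower censor_word) (PySem.Str.lower word)) then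
        rw ++ ["[REDACTED]"]
      else
        rw ++ [word]) []
    redacted_result ++ [PySem.Str.join " " redacted_words]) []

-- ===== PORT B =====
-- stage 1 of Source B: the set of every substring of length >= 4 of a censor word
def pvSubsIndex (words_to_censor : List String) : PySem.Set String :=
  words_to_censor.foldl (fun subs c =>
    (PySem.List.pyRange 0 (PySem.Str.len c + 1) 1).foldl (fun subs i =>
      let suffix := PySem.Str.slice c (some i) none
      (PySem.List.pyRange 4 (PySem.Str.len suffix + 1) 1).foldl (fun subs j =>
        PySem.Set.add subs (PySem.Str.slice suffix none (some j))) subs) subs)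
    PySem.Set.empty

-- Source B's per-word test: three set lookups (the third over the word's own slices)
def pvHit (exact subs lowered : PySem.Set String) (w : String) : Bool :=
  PySem.Set.contains exact w || PySem.Set.contains subs w ||
  (PySem.List.pyRange 0 (PySem.Str.len w + 1) 1).any (fun k =>
    (PySem.List.pyRange k (PySem.Str.len w + 1) 1).any (fun m =>
      PySem.Set.contains lowered (PySem.Str.slice w (some k) (some m))))

def censor_result_alt (result : List String) (words_to_censor : List String) : List String :=
  let exact := PySem.Set.ofList words_to_censor
  let subs := pvSubsIndex words_to_censor
  let lowered := PySem.Set.ofList (words_to_censor.map PySem.Str.lower)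
  result.foldl (fun redacted_result message =>
    let redacted_words := (PySem.Str.split₀ message).foldl (fun rw word =>
      let w := PySem.Str.lower word
      rw ++ [if pvHit exact subs lowered w then "[REDACTED]" else word]) []
    redacted_result ++ [PySem.Str.join " " redacted_words]) []

-- ===== PRECONDITION & SPEC =====
def Spec_censor_result (result : List String) (words_to_censor : List String) (out : List String) : Prop := out = censor_result_alt result words_to_censor
instance (result : List String) (words_to_censor : List String) (out : List String) : Decidable (Spec_censor_result result words_to_censor out) := by unfold Spec_censor_result; infer_instance

-- ===== CLAIM (what is proved, stated in full; the proofs are below) =====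
def Claim_equal_censor_result : Prop := ∀ (result : List String) (words_to_censor : List String), Dom_censor_result result words_to_censor → Spec_censor_result result words_to_censor (censor_result result words_to_censor)

-- ===== LEMMAS AND PROOFS =====

-- an infix is exactly a take-of-a-drop (with the exact length as the take bound)
lemma pv_infix_iff_drop_take (x u : List Char) :
    x <:+: u ↔ ∃ k : Nat, k ≤ u.length ∧ x.length ≤ u.length - k ∧ x = (u.drop k).take x.length := by
  constructor
  · intro hinf
    obtain ⟨t, hpre, hsuf⟩ := List.infix_iff_prefix_suffix.mp hinf
    obtain ⟨p, hp⟩ := hsuf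
    have hdrop : u.drop p.length = t := by rw [← hp]; simp
    have hlen : p.length + t.length = u.length := by rw [← hp]; simp
    have hxt : x.length ≤ t.length := hpre.length_le
    exact ⟨p.length, by omega, by omega, by rw [hdrop, ← List.prefix_iff_eq_take.mp hpre]⟩
  · rintro ⟨k, _, _, hx⟩
    rw [hx]
    exact List.IsInfix.trans (List.take_prefix _ _).isInfix (List.drop_suffix k u).isInfix

-- membership in a foldl of Set.update
lemma pv_mem_foldl_update {β : Type} (g : β → List String) (l : List β)
    (s : PySem.Set String) (x : String) :
    x ∈ l.foldl (fun s c => PySem.Set.update s (g c)) s ↔ x ∈ s ∨ ∃ c ∈ l, x ∈ g c := by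
  induction l generalizing s with
  | nil => simp
  | cons a t ih =>
    rw [List.foldl_cons, ih, PySem.Set.mem_update]
    simp only [List.mem_cons]
    constructor
    · rintro (⟨h | h⟩ | ⟨c, hc, hx⟩)
      · exact Or.inl h
      · exact Or.inr ⟨a, Or.inl rfl, h⟩
      · exact Or.inr ⟨c, Or.inr hc, hx⟩
    · rintro (h | ⟨c, (rfl | hc), hx⟩)
      · exact Or.inl (Or.inl h)
      · exact Or.inl (Or.inr hx)
      · exact Or.inr ⟨c, hc, hx⟩

-- what pvSubsIndex contains: exactly the strings of length ≥ 4 that occur inside a censor word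
lemma pv_mem_subsIndex (wc : List String) (x : String) :
    x ∈ pvSubsIndex wc ↔ 4 ≤ x.toList.length ∧ ∃ c ∈ wc, x.toList <:+: c.toList := by
  have hstep : ∀ c : String,
      (fun (subs : PySem.Set String) (i : Int) =>
        (PySem.List.pyRange 4 (PySem.Str.len (PySem.Str.slice c (some i) none) + 1) 1).foldl
          (fun subs j => PySem.Set.add subs
            (PySem.Str.slice (PySem.Str.slice c (some i) none) none (some j))) subs)
      = (fun subs i => PySem.Set.update subs
          ((PySem.List.pyRange 4 (PySem.Str.len (PySem.Str.slice c (some i) none) + 1) 1).map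
            (fun j => PySem.Str.slice (PySem.Str.slice c (some i) none) none (some j)))) := by
    intro c; funext subs i
    show _ = List.foldl PySem.Set.add subs (List.map _ _)
    rw [List.foldl_map]
  have houter : (fun (subs : PySem.Set String) (c : String) =>
      (PySem.List.pyRange 0 (PySem.Str.len c + 1) 1).foldl
        (fun subs i =>
          (PySem.List.pyRange 4 (PySem.Str.len (PySem.Str.slice c (some i) none) + 1) 1).foldl
            (fun subs j => PySem.Set.add subs
              (PySem.Str.slice (PySem.Str.slice c (some i) none) none (some j))) subs) subs)
      = (fun subs c => PySem.Set.update subs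
          ((PySem.List.pyRange 0 (PySem.Str.len c + 1) 1).flatMap (fun i =>
            (PySem.List.pyRange 4 (PySem.Str.len (PySem.Str.slice c (some i) none) + 1) 1).map
              (fun j => PySem.Str.slice (PySem.Str.slice c (some i) none) none (some j))))) := by
    funext subs c
    rw [hstep c]
    generalize PySem.List.pyRange 0 (PySem.Str.len c + 1) 1 = is
    induction is generalizing subs with
    | nil => simp [PySem.Set.update]
    | cons i is ih =>
      rw [List.foldl_cons, ih, List.flatMap_cons]
      show _ = List.foldl PySem.Set.add subs (_ ++ _)
      rw [List.foldl_append]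
      rfl
  unfold pvSubsIndex
  rw [houter, pv_mem_foldl_update]
  simp only [PySem.Set.empty, List.not_mem_nil, false_or, List.mem_flatMap, List.mem_map]
  constructor
  · rintro ⟨c, hc, i, hi, j, hj, rfl⟩
    rw [PySem.List.mem_pyRange_one] at hi hj
    have h0i : 0 ≤ i := hi.1
    have hlc : PySem.Str.len c = (c.toList.length : Int) := by simp [pysem]
    have hsuf : (PySem.Str.slice c (some i) none).toList = c.toList.drop i.toNat := by
      simp [PySem.Str.slice, PySem.List.slice_from _ h0i]
    have hlsuf : PySem.Str.len (PySem.Str.slice c (some i) none)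
        = ((c.toList.drop i.toNat).length : Int) := by
      simp [pysem, hsuf]
    rw [hlsuf] at hj
    have h4j : (4 : Int) ≤ j := hj.1
    have hsl : (PySem.Str.slice (PySem.Str.slice c (some i) none) none (some j)).toList
        = (c.toList.drop i.toNat).take j.toNat := by
      simp [PySem.Str.slice, PySem.List.slice_to _ (by omega : (0:Int) ≤ j), PySem.List.slice_from _ h0i]
    have hjlen : j.toNat ≤ (c.toList.drop i.toNat).length := by
      simp only [List.length_drop] at hj ⊢; omega
    constructor
    · rw [hsl, List.length_take]; omega
    · refine ⟨c, hc, ?_⟩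
      rw [hsl]
      exact List.IsInfix.trans (List.take_prefix _ _).isInfix (List.drop_suffix _ _).isInfix
  · rintro ⟨h4, c, hc, hinf⟩
    obtain ⟨k, hk, hjk, hx⟩ := (pv_infix_iff_drop_take _ _).mp hinf
    refine ⟨c, hc, (k : Int), ?_, (x.toList.length : Int), ?_, ?_⟩
    · rw [PySem.List.mem_pyRange_one]
      have : PySem.Str.len c = (c.toList.length : Int) := by simp [pysem]
      rw [this]; omega
    · rw [PySem.List.mem_pyRange_one]
      have hsuf : (PySem.Str.slice c (some (k : Int)) none).toList = c.toList.drop k := by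
        simp [PySem.Str.slice, PySem.List.slice_from _ (by positivity : (0:Int) ≤ (k:Int))]
      have : PySem.Str.len (PySem.Str.slice c (some (k : Int)) none)
          = ((c.toList.drop k).length : Int) := by simp [pysem, hsuf]
      rw [this]
      simp only [List.length_drop]
      omega
    · apply String.toList_inj.mp
      have hsuf : (PySem.Str.slice c (some (k : Int)) none).toList = c.toList.drop k := by
        simp [PySem.Str.slice, PySem.List.slice_from _ (by positivity : (0:Int) ≤ (k:Int))]
      rw [show (PySem.Str.slice (PySem.Str.slice c (some (k:Int)) none) none (some (x.toList.length : Int))).toList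
            = ((PySem.Str.slice c (some (k:Int)) none).toList.take x.toList.length) by
          simp [PySem.Str.slice]]
      rw [hsuf, ← hx]

-- the first lookup of pvHit is A's list-membership test
lemma pv_exact_eq (wc : List String) (w : String) :
    PySem.Set.contains (PySem.Set.ofList wc) w = wc.contains w := by
  rw [Bool.eq_iff_iff, PySem.Set.contains_iff, PySem.Set.mem_ofList, List.contains_iff_mem]

-- the second lookup of pvHit is A's "word inside a censor word (len ≥ 4)" scan
lemma pv_subs_eq (wc : List String) (w : String) :
    PySem.Set.contains (pvSubsIndex wc) w
      = (decide (4 ≤ PySem.Str.len w) && wc.any (fun c => PySem.Str.isIn w c)) := by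
  rw [Bool.eq_iff_iff, PySem.Set.contains_iff, pv_mem_subsIndex]
  have hl : PySem.Str.len w = (w.toList.length : Int) := by simp [pysem]
  simp only [Bool.and_eq_true, decide_eq_true_eq, List.any_eq_true, PySem.Str.isIn_iff_infix, hl]
  constructor
  · rintro ⟨h4, c, hc, hinf⟩; exact ⟨by omega, c, hc, hinf⟩
  · rintro ⟨h4, c, hc, hinf⟩; exact ⟨by omega, c, hc, hinf⟩

-- the slice-enumeration of pvHit is A's "censor word inside the word" scan
lemma pv_slices_eq (wc : List String) (w : String) :
    ((PySem.List.pyRange 0 (PySem.Str.len w + 1) 1).any (fun k =>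
      (PySem.List.pyRange k (PySem.Str.len w + 1) 1).any (fun m =>
        PySem.Set.contains (PySem.Set.ofList (wc.map PySem.Str.lower))
          (PySem.Str.slice w (some k) (some m)))))
      = wc.any (fun c => PySem.Str.isIn (PySem.Str.lower c) w) := by
  rw [Bool.eq_iff_iff]
  have hl : PySem.Str.len w = (w.toList.length : Int) := by simp [pysem]
  simp only [List.any_eq_true, PySem.Set.contains_iff, PySem.Set.mem_ofList, List.mem_map,
    PySem.Str.isIn_iff_infix, PySem.List.mem_pyRange_one, hl]
  constructor
  · rintro ⟨k, ⟨hk0, hk⟩, m, ⟨hkm, hm⟩, c, hc, hlc⟩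
    refine ⟨c, hc, ?_⟩
    rw [hlc]
    rw [show (PySem.Str.slice w (some k) (some m)).toList
          = (w.toList.drop k.toNat).take (m.toNat - k.toNat) by
        simp [PySem.Str.slice, PySem.List.slice_toNat _ hk0 (by omega : (0:Int) ≤ m)]]
    exact List.IsInfix.trans (List.take_prefix _ _).isInfix (List.drop_suffix _ _).isInfix
  · rintro ⟨c, hc, hinf⟩
    obtain ⟨k, hk, hjk, hx⟩ := (pv_infix_iff_drop_take _ _).mp hinf
    refine ⟨(k : Int), ⟨by positivity, by omega⟩,
      (k : Int) + ((PySem.Str.lower c).toList.length : Int), ⟨by omega, by omega⟩, c, hc, ?_⟩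
    apply String.toList_inj.mp
    rw [show (PySem.Str.slice w (some (k:Int)) (some ((k:Int) + ((PySem.Str.lower c).toList.length : Int)))).toList
          = (w.toList.drop k).take ((PySem.Str.lower c).toList.length) by
        simp [PySem.Str.slice, PySem.List.slice_natCast_add]]
    rw [← hx]

-- A's if-chain computes the same word as B's single pvHit test
lemma pv_word_eq (wc : List String) (word : String) :
    (if wc.contains (PySem.Str.lower word) then "[REDACTED]"
     else if wc.any (fun c => decide (4 ≤ PySem.Str.len (PySem.Str.lower word)) &&
            PySem.Str.isIn (PySem.Str.lower word) c) then "[REDACTED]"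
     else if wc.any (fun c => PySem.Str.isIn (PySem.Str.lower c) (PySem.Str.lower word)) then "[REDACTED]"
     else word)
      = (if pvHit (PySem.Set.ofList wc) (pvSubsIndex wc)
            (PySem.Set.ofList (wc.map PySem.Str.lower)) (PySem.Str.lower word)
         then "[REDACTED]" else word) := by
  have hand : wc.any (fun c => decide (4 ≤ PySem.Str.len (PySem.Str.lower word)) &&
        PySem.Str.isIn (PySem.Str.lower word) c)
      = (decide (4 ≤ PySem.Str.len (PySem.Str.lower word)) &&
         wc.any (fun c => PySem.Str.isIn (PySem.Str.lower word) c)) := by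
    cases hb : decide (4 ≤ PySem.Str.len (PySem.Str.lower word)) <;> simp
  unfold pvHit
  rw [pv_exact_eq, pv_subs_eq, pv_slices_eq, hand]
  cases wc.contains (PySem.Str.lower word) <;>
  cases (decide (4 ≤ PySem.Str.len (PySem.Str.lower word)) &&
      wc.any (fun c => PySem.Str.isIn (PySem.Str.lower word) c)) <;>
  cases wc.any (fun c => PySem.Str.isIn (PySem.Str.lower c) (PySem.Str.lower word)) <;> rfl

-- ===== VERDICT (by name: the statement is the Claim_ definition above) =====
theorem censor_result_spec : Claim_equal_censor_result := by
  intro result wc _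
  show censor_result result wc = censor_result_alt result wc
  unfold censor_result censor_result_alt
  rw [PySem.List.foldl_append_singleton_eq_map, PySem.List.foldl_append_singleton_eq_map]
  apply List.map_congr_left
  intro m _
  congr 1
  rw [PySem.List.foldl_append_singleton_eq_map, List.nil_append]
  have hf : (fun (rw : List String) word =>
      if wc.contains (PySem.Str.lower word) then rw ++ ["[REDACTED]"]
      else if wc.any (fun censor_word =>
          decide (4 ≤ PySem.Str.len (PySem.Str.lower word)) &&
          PySem.Str.isIn (PySem.Str.lower word) censor_word) then rw ++ ["[REDACTED]"]
      else if wc.any (fun censor_word =>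
          PySem.Str.isIn (PySem.Str.lower censor_word) (PySem.Str.lower word)) then rw ++ ["[REDACTED]"]
      else rw ++ [word])
      = (fun rw word => rw ++ [if wc.contains (PySem.Str.lower word) then "[REDACTED]"
          else if wc.any (fun c => decide (4 ≤ PySem.Str.len (PySem.Str.lower word)) &&
              PySem.Str.isIn (PySem.Str.lower word) c) then "[REDACTED]"
          else if wc.any (fun c => PySem.Str.isIn (PySem.Str.lower c) (PySem.Str.lower word)) then "[REDACTED]"
          else word]) := by
    funext rw word; split_ifs <;> rfl
  rw [hf, PySem.List.foldl_append_singleton_eq_map, List.nil_append]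
  apply List.map_congr_left
  intro word _
  exact pv_word_eq wc word
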